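-- pv_equiv track=rewrite | github.com/lightbug-io/toit-lightbug | tools/bitmap_toit.py | _pack_bytes
-- ===== SOURCE A (Python) =====
-- import math
--
-- def _pack_bytes(grid: list[list[int]], width: int) -> list[int]:
--     bytes_per_row = math.ceil(width / 8)
--     packed: list[int] = []
--     for row in grid:
--         for byte_index in range(bytes_per_row):
--             byte = 0
--             for bit in range(8):
--                 col = byte_index * 8 + bit
--                 bit_value = row[col] if col < width else 0
--                 byte |= (bit_value << (7 - bit))
--             packed.append(byte)
--     return packed
-- ===== SOURCE B (Python) =====
-- import math
--
-- def _pack_bytes(grid: list[list[int]], width: int) -> list[int]: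
--     bytes_per_row = math.ceil(width / 8)
--     packed: list[int] = []
--     for row in grid:
--         rowbytes = [0] * bytes_per_row
--         for col in range(width):
--             rowbytes[col // 8] |= row[col] << (7 - col % 8)
--         packed.extend(rowbytes)
--     return packed
-- ===== Notes on version B (the rewrite author's own statement) =====
-- stated objective: simpler
-- what changed: Replaces the per-byte gather (nested byte_index/bit loops reading row[col] with an out-of-range guard) by a per-pixel scatter: a zeroed bytes_per_row buffer per row and one loop over columns doing rowbytes[col//8] |= row[col] << (7 - col%8), so padding is implicit in the zero buffer.
import Mathlib
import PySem

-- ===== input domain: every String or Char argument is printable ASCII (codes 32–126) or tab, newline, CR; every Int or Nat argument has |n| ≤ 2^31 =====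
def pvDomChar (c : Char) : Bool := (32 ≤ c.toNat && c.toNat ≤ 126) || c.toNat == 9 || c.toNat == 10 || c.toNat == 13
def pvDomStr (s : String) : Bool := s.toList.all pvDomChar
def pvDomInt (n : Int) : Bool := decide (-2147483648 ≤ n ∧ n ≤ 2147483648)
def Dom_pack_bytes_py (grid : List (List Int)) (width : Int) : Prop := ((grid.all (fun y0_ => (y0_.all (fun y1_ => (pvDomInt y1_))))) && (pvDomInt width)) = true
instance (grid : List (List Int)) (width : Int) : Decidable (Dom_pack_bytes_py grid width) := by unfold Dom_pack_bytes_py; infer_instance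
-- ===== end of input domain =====

-- B replaces A's per-byte gather (nested byte_index/bit loops with an out-of-range guard on each read)
-- by a per-pixel scatter into a zero-initialized per-row buffer (objective: simpler decomposition).

-- ===== PORT A =====
def pack_bytes_py (grid : List (List Int)) (width : Int) : List Int :=
  -- math.ceil(width / 8): ported as ceiling division -((-width)//8), exact on Dom (|width| ≤ 2^31, /8 is exact in float)
  let bytes_per_row : Int := -(PySem.Int.floordiv (-width) 8)
  grid.foldl (fun (packed : List Int) (row : List Int) =>
    (PySem.List.pyRange 0 bytes_per_row 1).foldl (fun packed byte_index =>
      packed ++ [(PySem.List.pyRange 0 8 1).foldl (fun byte bit =>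
        let col : Int := byte_index * 8 + bit
        -- row[col]: pyGetD; in range under Pre_ (col < width ≤ len row)
        let bit_value : Int := if col < width then PySem.List.pyGetD row col 0 else 0
        PySem.Int.bor byte (bit_value <<< (7 - bit).toNat)) 0]) packed) []

-- ===== PORT B =====
def pack_bytes_py_alt (grid : List (List Int)) (width : Int) : List Int :=
  -- math.ceil(width / 8): same port of the same Python expression as in A
  let bytes_per_row : Int := -(PySem.Int.floordiv (-width) 8)
  grid.foldl (fun (packed : List Int) (row : List Int) =>
    -- [0] * bytes_per_row ([] when bytes_per_row ≤ 0, as in Python)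
    let rowbytes := (PySem.List.pyRange 0 width 1).foldl (fun (rb : List Int) (col : Int) =>
      -- rowbytes[col // 8] |= row[col] << (7 - col % 8); buffer index always in range, row[col] in range under Pre_
      PySem.List.pySetD rb (PySem.Int.floordiv col 8)
        (PySem.Int.bor (PySem.List.pyGetD rb (PySem.Int.floordiv col 8) 0)
          ((PySem.List.pyGetD row col 0 <<< (7 - PySem.Int.mod col 8).toNat : Int))))
      (List.replicate bytes_per_row.toNat 0)
    packed ++ rowbytes) []

-- ===== PRECONDITION & SPEC =====
-- Pre_ excludes exactly the inputs where Python A raises IndexError: width > 0 and some row shorter than width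
-- (row[col] is read for every col < width).  B raises there too.
def Pre_pack_bytes_py (grid : List (List Int)) (width : Int) : Prop :=
  width ≤ 0 ∨ ∀ row ∈ grid, width ≤ (row.length : Int)
instance (grid : List (List Int)) (width : Int) : Decidable (Pre_pack_bytes_py grid width) := by unfold Pre_pack_bytes_py; infer_instance
def pvWitness_pack_bytes_py : List (List Int) × Int := ([[1, 0, 1]], 3)

def Spec_pack_bytes_py (grid : List (List Int)) (width : Int) (out : List Int) : Prop := out = pack_bytes_py_alt grid width
instance (grid : List (List Int)) (width : Int) (out : List Int) : Decidable (Spec_pack_bytes_py grid width out) := by unfold Spec_pack_bytes_py; infer_instance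

-- ===== CLAIM (what is proved, stated in full; the proofs are below) =====
def Claim_equal_pack_bytes_py : Prop := ∀ (grid : List (List Int)) (width : Int), Dom_pack_bytes_py grid width → Pre_pack_bytes_py grid width → Spec_pack_bytes_py grid width (pack_bytes_py grid width)

-- ===== LEMMAS AND PROOFS =====

-- A's inner 8-bit step, and A's partial byte after the first k bits of byte j
def pvStepA (row : List Int) (width : Int) (byte_index : Int) (byte bit : Int) : Int :=
  let col : Int := byte_index * 8 + bit
  let bit_value : Int := if col < width then PySem.List.pyGetD row col 0 else 0
  PySem.Int.bor byte (bit_value <<< (7 - bit).toNat)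

def pvG (row : List Int) (width : Int) (j : Int) (k : Int) : Int :=
  (PySem.List.pyRange 0 k 1).foldl (pvStepA row width j) 0

-- B's scatter step
def pvStepB (row : List Int) (rb : List Int) (col : Int) : List Int :=
  PySem.List.pySetD rb (PySem.Int.floordiv col 8)
    (PySem.Int.bor (PySem.List.pyGetD rb (PySem.Int.floordiv col 8) 0)
      ((PySem.List.pyGetD row col 0 <<< (7 - PySem.Int.mod col 8).toNat : Int)))

theorem pvG_succ (row : List Int) (w j k : Int) (hk : 0 ≤ k) :
    pvG row w j (k + 1) = pvStepA row w j (pvG row w j k) k := by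
  rw [pvG, pvG, PySem.List.pyRange_one_succ_right hk, List.foldl_append]
  rfl

theorem pvStepA_pad (row : List Int) (w j b k : Int) (h : w ≤ j * 8 + k) :
    pvStepA row w j b k = b := by
  simp [pvStepA, if_neg (not_lt.mpr h), PySem.Int.bor_zero]

theorem pvG_pad (row : List Int) (w j : Int) (d : Nat) (k : Int) (hk : 0 ≤ k)
    (h : w ≤ j * 8 + k) : pvG row w j (k + d) = pvG row w j k := by
  induction d with
  | zero => simp
  | succ d ih =>
    have : k + (d + 1 : Nat) = (k + d) + 1 := by push_cast; ring
    rw [this, pvG_succ row w j (k + d) (by positivity), pvStepA_pad row w j _ _ (by omega), ih]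

-- the scatter invariant: after the first c columns the buffer holds the partial bytes
theorem pvScatterInv (row : List Int) (w : Int) (n : Nat) (hn : w ≤ 8 * (n : Int))
    (c : Nat) (hc : (c : Int) ≤ w) :
    (PySem.List.pyRange 0 (c : Int) 1).foldl (pvStepB row) (List.replicate n 0)
      = (List.range n).map (fun (j : Nat) => pvG row w (j : Int) (Int.ofNat (min 8 (c - 8 * j)))) := by
  induction c with
  | zero =>
    simp [pvG, PySem.List.pyRange_one_eq_nil (le_refl (0 : Int))]
  | succ c ih =>
    have hc' : (c : Int) ≤ w := by push_cast at hc ⊢; omega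
    have hcast : ((c + 1 : Nat) : Int) = (c : Int) + 1 := by push_cast; ring
    rw [hcast, PySem.List.pyRange_one_succ_right (by positivity), List.foldl_append, ih hc']
    -- one scatter step at col = c
    have hcw : (c : Int) < w := by push_cast at hc; omega
    have hjn : c / 8 < n := by
      have : (c : Int) < 8 * (n : Int) := lt_of_lt_of_le hcw hn
      have : c < 8 * n := by exact_mod_cast this
      omega
    have hdiv : PySem.Int.floordiv (c : Int) 8 = ((c / 8 : Nat) : Int) := by
      exact_mod_cast PySem.Int.floordiv_natCast c 8
    have hmod : PySem.Int.mod (c : Int) 8 = ((c % 8 : Nat) : Int) := by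
      exact_mod_cast PySem.Int.mod_natCast c 8
    simp only [List.foldl_cons, List.foldl_nil, pvStepB, hdiv, hmod,
      PySem.List.pySetD_natCast, PySem.List.pyGetD_natCast]
    apply List.ext_getElem
    · simp
    · intro i h1 h2
      simp only [List.length_set, List.length_map, List.length_range] at h1 h2
      have hget : ∀ (f : Nat → Int) (m : Nat) (hm : m < n),
          ((List.range n).map f).getD m 0 = f m := by
        intro f m hm
        rw [List.getD_eq_getElem _ _ (by simpa using hm)]
        simp
      rw [List.getElem_set]
      simp only [List.getElem_map, List.getElem_range, Int.ofNat_eq_natCast] at *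
      by_cases hij : c / 8 = i
      · subst hij
        rw [if_pos rfl, hget _ _ hjn]
        -- the updated byte: min 8 (c - 8*(c/8)) = c % 8, min 8 (c+1 - 8*(c/8)) = c % 8 + 1
        have hb : min 8 (c - 8 * (c / 8)) = c % 8 := by omega
        have hb1 : min 8 (c + 1 - 8 * (c / 8)) = c % 8 + 1 := by omega
        rw [hb, hb1]
        have hcast1 : ((c % 8 + 1 : Nat) : Int) = ((c % 8 : Nat) : Int) + 1 := by push_cast; ring
        rw [hcast1, pvG_succ _ _ _ _ (by positivity)]
        simp only [pvStepA]
        have hcol : ((c / 8 : Nat) : Int) * 8 + ((c % 8 : Nat) : Int) = (c : Int) := by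
          push_cast; omega
        rw [hcol, if_pos hcw, PySem.List.pyGetD_natCast]
      · rw [if_neg hij]
        rw [show min 8 (c + 1 - 8 * i) = min 8 (c - 8 * i) from by omega]

-- A's row (list of gathered bytes) equals B's row (the scattered buffer)
theorem pvRow (row : List Int) (w : Int) :
    (PySem.List.pyRange 0 (-(PySem.Int.floordiv (-w) 8)) 1).map (fun bi => pvG row w bi 8)
      = (PySem.List.pyRange 0 w 1).foldl (pvStepB row)
          (List.replicate (-(PySem.Int.floordiv (-w) 8)).toNat 0) := by
  by_cases hw : w ≤ 0
  · have h1 : -(PySem.Int.floordiv (-w) 8) ≤ 0 := by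
      have := (PySem.Int.le_floordiv_iff_mul_le (a := -w) (b := 8) (q := 0) (by norm_num)).mpr
        (by omega)
      omega
    rw [PySem.List.pyRange_one_eq_nil h1, PySem.List.pyRange_one_eq_nil hw,
      Int.toNat_of_nonpos h1]
    simp
  · rw [not_le] at hw
    set bpr : Int := -(PySem.Int.floordiv (-w) 8) with hbpr
    have hineq : (bpr - 1) * 8 < w ∧ w ≤ bpr * 8 :=
      (PySem.Int.neg_floordiv_neg_eq_iff_of_pos (a := w) (b := 8) (q := bpr)
        (by norm_num)).mp rfl
    have hbpr_pos : 0 < bpr := by nlinarith [hineq.1, hineq.2]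
    set n : Nat := bpr.toNat with hn
    have hnI : (n : Int) = bpr := Int.toNat_of_nonneg (le_of_lt hbpr_pos)
    set wN : Nat := w.toNat with hwN
    have hwI : (wN : Int) = w := Int.toNat_of_nonneg (le_of_lt hw)
    have hwn : w ≤ 8 * (n : Int) := by rw [hnI]; omega
    have h8 : 8 * (n - 1) < wN ∧ wN ≤ 8 * n := by
      have h1 : (bpr - 1) * 8 < w := hineq.1
      have h2 : w ≤ bpr * 8 := hineq.2
      omega
    rw [show PySem.List.pyRange 0 w 1 = PySem.List.pyRange 0 ((wN : Nat) : Int) 1 from by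
      rw [hwI]]
    rw [pvScatterInv row w n hwn wN (by rw [hwI])]
    rw [PySem.List.pyRange_one, List.map_map]
    simp only [sub_zero, Int.ofNat_eq_natCast]
    apply List.map_congr_left
    intro k hk
    have hkn : k < n := by
      rw [List.mem_range] at hk
      omega
    simp only [Function.comp_apply, zero_add]
    -- pad pvG from min 8 (wN - 8*k) up to 8
    rcases Nat.lt_or_ge (wN - 8 * k) 8 with hsmall | hbig
    swap
    · rw [show min 8 (wN - 8 * k) = 8 from by omega]
      norm_num
    · have h8k : 8 * k ≤ wN := by
        have := h8.1
        omega
      rw [show min 8 (wN - 8 * k) = wN - 8 * k from by omega]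
      have hd : ((wN - 8 * k : Nat) : Int) + ((8 - (wN - 8 * k) : Nat) : Int) = 8 := by
        omega
      rw [← hd, pvG_pad row w (k : Int) (8 - (wN - 8 * k)) (((wN - 8 * k : Nat) : Int))
        (by positivity) (by omega)]

-- ===== VERDICT (by name: the statement is the Claim_ definition above) =====
theorem pack_bytes_py_spec : Claim_equal_pack_bytes_py := by
  intro grid width _ _
  unfold Spec_pack_bytes_py pack_bytes_py pack_bytes_py_alt
  apply List.foldl_ext
  intro packed row _
  show (PySem.List.pyRange 0 (-(PySem.Int.floordiv (-width) 8)) 1).foldl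
      (fun p bi => p ++ [pvG row width bi 8]) packed
    = packed ++ (PySem.List.pyRange 0 width 1).foldl (pvStepB row)
        (List.replicate (-(PySem.Int.floordiv (-width) 8)).toNat 0)
  rw [PySem.List.foldl_append_singleton_eq_map (fun bi => pvG row width bi 8)]
  rw [pvRow row width]
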